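-- pv_equiv track=rewrite | github.com/dock108dev/sda | api/app/services/pipeline/stages/generate_summary.py | _by_period
-- ===== SOURCE A (Python) =====
-- from typing import Any
--
-- def _by_period(pbp_events: list[dict[str, Any]]) -> list[tuple[int, int]]:
--     """Per-period (home, away) points scored. Order matches play order."""
--     if not pbp_events:
--         return []
--     by_period: dict[int, tuple[int, int]] = {}
--     last_h = 0
--     last_a = 0
--     last_period = 0
--     period_start_h = 0
--     period_start_a = 0
--     for ev in pbp_events:
--         period = ev.get("quarter") or ev.get("period") or 1
--         if period != last_period:
--             if last_period > 0:
--                 by_period[last_period] = (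
--                     last_h - period_start_h,
--                     last_a - period_start_a,
--                 )
--             period_start_h = last_h
--             period_start_a = last_a
--             last_period = period
--         last_h = ev.get("home_score") or last_h
--         last_a = ev.get("away_score") or last_a
--     if last_period > 0:
--         by_period[last_period] = (
--             last_h - period_start_h,
--             last_a - period_start_a,
--         )
--     return [by_period[p] for p in sorted(by_period)]
-- ===== SOURCE B (Python) =====
-- def _by_period(pbp_events):
--     """Per-period (home, away) points scored. Order matches play order."""
--     # pass 1: per-event (period, cumulative home, cumulative away)
--     cum = []
--     h = a = 0
--     for ev in pbp_events:
--         p = ev.get("quarter") or ev.get("period") or 1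
--         h = ev.get("home_score") or h
--         a = ev.get("away_score") or a
--         cum.append((p, h, a))
--     # pass 2: keep only the last event of each maximal contiguous run of equal period
--     ends = []
--     for i in range(len(cum)):
--         if i + 1 == len(cum) or cum[i + 1][0] != cum[i][0]:
--             ends.append(cum[i])
--     # pass 3: each run scored (cumulative at run end) - (cumulative at previous run end)
--     by_period = {}
--     ph = pa = 0
--     for p, eh, ea in ends:
--         if p > 0:
--             by_period[p] = (eh - ph, ea - pa)
--         ph, pa = eh, ea
--     return [by_period[q] for q in sorted(by_period)]
-- ===== Notes on version B (the rewrite author's own statement) =====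
-- stated objective: alternative
-- what changed: B replaces A's single stateful loop (boundary flush + final flush with period_start bookkeeping) by two passes: first materialize per-event (period, cumulative home, cumulative away) triples, then scan maximal contiguous runs of equal period and record each run's delta against the cumulative just before the run.
import Mathlib
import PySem

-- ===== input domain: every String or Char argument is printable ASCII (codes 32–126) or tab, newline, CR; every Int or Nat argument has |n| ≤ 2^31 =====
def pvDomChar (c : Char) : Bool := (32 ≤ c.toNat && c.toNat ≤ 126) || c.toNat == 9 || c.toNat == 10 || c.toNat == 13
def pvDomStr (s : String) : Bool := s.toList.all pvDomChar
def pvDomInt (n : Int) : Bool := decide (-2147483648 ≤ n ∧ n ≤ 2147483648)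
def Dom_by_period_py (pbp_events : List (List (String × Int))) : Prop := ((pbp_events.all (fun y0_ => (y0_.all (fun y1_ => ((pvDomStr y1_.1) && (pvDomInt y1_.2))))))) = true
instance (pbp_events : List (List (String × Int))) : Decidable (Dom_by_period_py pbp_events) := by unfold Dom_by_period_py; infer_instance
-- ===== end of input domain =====

-- B re-decomposes A's stateful boundary-flush loop into three passes: a cumulative-score
-- list, the last event of each contiguous equal-period run, then per-run deltas (alternative decomposition, same cost).


-- ===== PORT A =====
-- `x or d` for x an Optional[int]: falsy = missing or 0
def pvOrD (o : Option Int) (d : Int) : Int :=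
  match o with
  | some v => if v = 0 then d else v
  | none => d

-- `ev.get("quarter") or ev.get("period") or 1`
def pvPeriod (ev : List (String × Int)) : Int :=
  pvOrD (List.lookup "quarter" ev) (pvOrD (List.lookup "period" ev) 1)

-- A's loop state: (by_period, last_h, last_a, last_period, period_start_h, period_start_a)
def aLoop : List (List (String × Int)) →
    (PySem.Dict Int (Int × Int) × Int × Int × Int × Int × Int) →
    (PySem.Dict Int (Int × Int) × Int × Int × Int × Int × Int)
  | [], s => s
  | ev :: rest, (d, lh, la, lp, psh, psa) =>
    let period := pvPeriod ev
    let (d', lp', psh', psa') :=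
      if period ≠ lp then
        (if lp > 0 then d.insert lp (lh - psh, la - psa) else d, period, lh, la)
      else (d, lp, psh, psa)
    let lh' := pvOrD (List.lookup "home_score" ev) lh
    let la' := pvOrD (List.lookup "away_score" ev) la
    aLoop rest (d', lh', la', lp', psh', psa')

def by_period_py (pbp_events : List (List (String × Int))) : List (Int × Int) :=
  match pbp_events with
  | [] => []
  | _ =>
    match aLoop pbp_events (PySem.Dict.empty, 0, 0, 0, 0, 0) with
    | (d, lh, la, lp, psh, psa) =>
      let d' := if lp > 0 then d.insert lp (lh - psh, la - psa) else d
      (PySem.List.sorted d'.keys (fun p => p) false).map (fun p => (d'.get? p).getD (0, 0))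

-- ===== PORT B =====
-- pass 1: per-event (period, cumulative home, cumulative away)
def cumEvents : List (List (String × Int)) → Int → Int → List (Int × Int × Int)
  | [], _, _ => []
  | ev :: rest, h, a =>
    let p := pvPeriod ev
    let h' := pvOrD (List.lookup "home_score" ev) h
    let a' := pvOrD (List.lookup "away_score" ev) a
    (p, h', a') :: cumEvents rest h' a'

-- pass 2: keep cum[i] iff i is the last index of its contiguous equal-period run
def runEnds : List (Int × Int × Int) → List (Int × Int × Int)
  | [] => []
  | [t] => [t]
  | t :: u :: rest => if u.1 == t.1 then runEnds (u :: rest) else t :: runEnds (u :: rest)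

-- pass 3 body: record the run's delta against the previous run end, carry (ph, pa) forward
def bStep (s : PySem.Dict Int (Int × Int) × Int × Int) (t : Int × Int × Int) :
    PySem.Dict Int (Int × Int) × Int × Int :=
  (if t.1 > 0 then s.1.insert t.1 (t.2.1 - s.2.1, t.2.2 - s.2.2) else s.1, t.2.1, t.2.2)

def by_period_py_alt (pbp_events : List (List (String × Int))) : List (Int × Int) :=
  let ends := runEnds (cumEvents pbp_events 0 0)
  let d := (ends.foldl bStep (PySem.Dict.empty, 0, 0)).1
  (PySem.List.sorted d.keys (fun p => p) false).map (fun p => (d.get? p).getD (0, 0))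

-- ===== PRECONDITION & SPEC =====
def Spec_by_period_py (pbp_events : List (List (String × Int))) (out : List (Int × Int)) : Prop := out = by_period_py_alt pbp_events
instance (pbp_events : List (List (String × Int))) (out : List (Int × Int)) : Decidable (Spec_by_period_py pbp_events out) := by unfold Spec_by_period_py; infer_instance

-- ===== CLAIM (what is proved, stated in full; the proofs are below) =====
def Claim_equal_by_period_py : Prop := ∀ (pbp_events : List (List (String × Int))), Dom_by_period_py pbp_events → Spec_by_period_py pbp_events (by_period_py pbp_events)

-- ===== LEMMAS AND PROOFS =====

-- proof-only bridge: a per-event "eager" recording fold over the cumulative list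
def eagerFold : List (Int × Int × Int) →
    (PySem.Dict Int (Int × Int) × Int × Int × Int × Int × Int) → PySem.Dict Int (Int × Int)
  | [], (d, _, _, _, _, _) => d
  | (p, h, a) :: rest, (d, ph, pa, cp, lh, la) =>
    let (ph', pa') := if p ≠ cp then (lh, la) else (ph, pa)
    eagerFold rest (if p > 0 then d.insert p (h - ph', a - pa') else d, ph', pa', p, h, a)

-- A's trailing flush
def aFlush (s : PySem.Dict Int (Int × Int) × Int × Int × Int × Int × Int) : PySem.Dict Int (Int × Int) :=
  match s with
  | (d, lh, la, lp, psh, psa) => if lp > 0 then d.insert lp (lh - psh, la - psa) else d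

theorem pvOrD_ne_zero (o : Option Int) (d : Int) (hd : d ≠ 0) : pvOrD o d ≠ 0 := by
  unfold pvOrD
  cases o with
  | none => exact hd
  | some v =>
    by_cases hv : v = 0
    · simp [hv, hd]
    · simp [hv]

theorem pvPeriod_ne_zero (ev : List (String × Int)) : pvPeriod ev ≠ 0 :=
  pvOrD_ne_zero _ _ (pvOrD_ne_zero _ _ one_ne_zero)

-- L1: A's loop followed by the flush equals the eager per-event fold over the cumulative list
theorem aLoop_eq_eagerFold (es : List (List (String × Int)))
    (d : PySem.Dict Int (Int × Int)) (lh la lp psh psa : Int) :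
    aFlush (aLoop es (d, lh, la, lp, psh, psa)) =
      eagerFold (cumEvents es lh la) (aFlush (d, lh, la, lp, psh, psa), psh, psa, lp, lh, la) := by
  induction es generalizing d lh la lp psh psa with
  | nil => rfl
  | cons ev rest ih =>
    simp only [aLoop, cumEvents, eagerFold]
    by_cases hp : pvPeriod ev = lp
    · -- same period: continue the run
      simp only [hp, ne_eq, not_true_eq_false, ite_false]
      rw [ih]
      simp only [aFlush]
      by_cases hlp : lp > 0
      · simp [hlp, PySem.Dict.insert_insert_self]
      · simp [hlp]
    · -- period change: A flushes the old run; both sides carry the same dict forward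
      simp only [ne_eq, hp, not_false_eq_true, ite_true]
      rw [ih]
      simp only [aFlush]

-- head of runEnds of a nonempty list keeps the first run's period
theorem runEnds_head (l : List (Int × Int × Int)) (t : Int × Int × Int) :
    ∃ eh ea tail, runEnds (t :: l) = (t.1, eh, ea) :: tail := by
  induction l generalizing t with
  | nil => exact ⟨t.2.1, t.2.2, [], rfl⟩
  | cons u l' ih =>
    by_cases h : u.1 = t.1
    · obtain ⟨eh, ea, tail, htail⟩ := ih u
      refine ⟨eh, ea, tail, ?_⟩
      rw [show runEnds (t :: u :: l') = runEnds (u :: l') from by simp [runEnds, h], htail, h]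
    · exact ⟨t.2.1, t.2.2, runEnds (u :: l'), by simp [runEnds, h]⟩

-- an earlier insert at the key of the first run end is overwritten
theorem bFold_insert_absorb (tail : List (Int × Int × Int)) (k eh ea : Int)
    (d : PySem.Dict Int (Int × Int)) (w : Int × Int) (ph pa : Int) :
    (((k, eh, ea) :: tail).foldl bStep ((if k > 0 then d.insert k w else d), ph, pa)) =
      (((k, eh, ea) :: tail).foldl bStep (d, ph, pa)) := by
  simp only [List.foldl_cons, bStep]
  by_cases hk : k > 0
  · simp [hk, PySem.Dict.insert_insert_self]
  · simp [hk]

-- L2: the eager fold equals B's fold over the run ends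
theorem eagerFold_eq_bFold (cum : List (Int × Int × Int))
    (d : PySem.Dict Int (Int × Int)) (ph pa lh la p : Int) :
    eagerFold cum (d, ph, pa, p, lh, la) =
      (if cum.head?.map (·.1) = some p
       then ((runEnds cum).foldl bStep (d, ph, pa)).1
       else ((runEnds cum).foldl bStep (d, lh, la)).1) := by
  induction cum generalizing d ph pa lh la p with
  | nil => simp [eagerFold, runEnds]
  | cons t cum' ih =>
    obtain ⟨q, h, a⟩ := t
    simp only [eagerFold]
    rw [ih]
    cases cum' with
    | nil => by_cases hq : q = p <;> simp [runEnds, hq, bStep]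
    | cons u cum'' =>
      obtain ⟨eh, ea, tail, htail⟩ := runEnds_head cum'' u
      by_cases hu : u.1 = q
      · have h1 : runEnds ((q, h, a) :: u :: cum'') = (q, eh, ea) :: tail := by
          rw [show runEnds ((q, h, a) :: u :: cum'') = runEnds (u :: cum'') from by
                simp [runEnds, hu],
              htail, hu]
        have h2 : runEnds (u :: cum'') = (q, eh, ea) :: tail := by rw [htail, hu]
        by_cases hq : q = p
        · subst hq
          simp only [ne_eq, not_true_eq_false, ite_false, List.head?_cons, Option.map_some,
            hu, h1, h2]
          rw [bFold_insert_absorb]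
          simp
        · simp only [ne_eq, hq, not_false_eq_true, ite_true, List.head?_cons, Option.map_some,
            hu, h1, h2, Option.some.injEq]
          rw [bFold_insert_absorb]
          simp
      · have h1 : runEnds ((q, h, a) :: u :: cum'') = (q, h, a) :: runEnds (u :: cum'') := by
          simp [runEnds, hu]
        by_cases hq : q = p
        · subst hq
          simp only [ne_eq, not_true_eq_false, ite_false, List.head?_cons, Option.map_some,
            h1]
          simp [bStep, List.foldl_cons, hu]
        · simp only [ne_eq, hq, not_false_eq_true, ite_true, List.head?_cons, Option.map_some,
            if_neg (by simpa using hu), h1, Option.some.injEq]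
          simp [bStep, List.foldl_cons]

-- ===== VERDICT (by name: the statement is the Claim_ definition above) =====
theorem by_period_py_spec : Claim_equal_by_period_py := by
  intro es _
  unfold Spec_by_period_py
  cases es with
  | nil => rfl
  | cons ev rest =>
    unfold by_period_py by_period_py_alt
    have key : aFlush (aLoop (ev :: rest) (PySem.Dict.empty, 0, 0, 0, 0, 0)) =
        ((runEnds (cumEvents (ev :: rest) 0 0)).foldl bStep (PySem.Dict.empty, 0, 0)).1 := by
      rw [show aFlush (aLoop (ev :: rest) (PySem.Dict.empty, 0, 0, 0, 0, 0)) =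
          eagerFold (cumEvents (ev :: rest) 0 0) (PySem.Dict.empty, 0, 0, 0, 0, 0) from
        aLoop_eq_eagerFold (ev :: rest) PySem.Dict.empty 0 0 0 0 0]
      rw [eagerFold_eq_bFold]
      have hhead : (cumEvents (ev :: rest) 0 0).head?.map (·.1) ≠ some 0 := by
        simp [cumEvents, pvPeriod_ne_zero ev]
      rw [if_neg hhead]
    generalize hs : aLoop (ev :: rest) (PySem.Dict.empty, 0, 0, 0, 0, 0) = s
    rw [hs] at key
    obtain ⟨d, lh, la, lp, psh, psa⟩ := s
    simp only [aFlush] at key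
    simp only [key]
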